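-- pv_equiv track=rewrite | github.com/dude123studios/LLMSampling | mechanistic/analysis/visualize.py | abbreviate_label
-- ===== SOURCE A (Python) =====
-- def abbreviate_label(text):
--     """Abbreviate common terms for axis labels."""
--     mapping = {
--         "Temperature": "Temp",
--         "Variance": "Var",
--         "Distance": "Dist",
--         "Oracle": "Oracle",
--         "Trajectory": "Traj"
--     }
--     for k, v in mapping.items():
--         text = text.replace(k, v)
--     return text
-- ===== SOURCE B (Python) =====
-- def abbreviate_label(text):
--     """Abbreviate common terms for axis labels (single left-to-right scan)."""
--     mapping = {
--         "Temperature": "Temp",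
--         "Variance": "Var",
--         "Distance": "Dist",
--         "Oracle": "Oracle",
--         "Trajectory": "Traj"
--     }
--     out = []
--     i = 0
--     n = len(text)
--     while i < n:
--         for k, v in mapping.items():
--             if text.startswith(k, i):
--                 out.append(v)
--                 i += len(k)
--                 break
--         else:
--             out.append(text[i])
--             i += 1
--     return "".join(out)
-- ===== Notes on version B (the rewrite author's own statement) =====
-- stated objective: alternative
-- what changed: Replaces A's five sequential full-string str.replace passes (each rescanning the whole, possibly rewritten, string) by one left-to-right scan that at each position dispatches on the mapping keys in dict order, emitting the value and jumping past the key on a match; equal because no key overlaps another key or any replacement value.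
import Mathlib
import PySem

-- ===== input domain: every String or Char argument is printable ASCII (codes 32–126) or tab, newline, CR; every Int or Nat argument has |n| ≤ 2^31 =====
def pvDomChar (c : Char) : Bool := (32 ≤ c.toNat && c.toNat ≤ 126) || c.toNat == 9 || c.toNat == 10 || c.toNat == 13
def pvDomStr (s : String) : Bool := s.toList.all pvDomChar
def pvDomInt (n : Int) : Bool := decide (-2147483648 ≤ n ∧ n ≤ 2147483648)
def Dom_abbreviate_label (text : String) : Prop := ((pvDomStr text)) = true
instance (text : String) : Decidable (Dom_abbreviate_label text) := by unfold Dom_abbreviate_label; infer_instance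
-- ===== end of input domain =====

-- B replaces A's five sequential full-string .replace passes by one left-to-right scan
-- dispatching on the mapping keys (objective: alternative single-pass structure).


-- ===== PORT A =====
-- A builds the mapping dict and runs text.replace(k, v) once per pair, in dict order.
def abbreviate_label (text : String) : String :=
  let mapping : List (String × String) :=
    [("Temperature", "Temp"), ("Variance", "Var"), ("Distance", "Dist"),
     ("Oracle", "Oracle"), ("Trajectory", "Traj")]
  mapping.foldl (fun t kv => PySem.Str.replace t kv.1 kv.2) text

-- ===== PORT B =====
-- Source B's while-loop: at each position try the keys in dict order; on a match emit the
-- value and jump past the key, otherwise emit the character and advance by one.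
def altScan (cs : List Char) : List Char :=
  match cs with
  | [] => []
  | c :: t =>
    if ("Temperature".toList).isPrefixOf (c :: t) then
      "Temp".toList ++ altScan (List.drop 11 (c :: t))
    else if ("Variance".toList).isPrefixOf (c :: t) then
      "Var".toList ++ altScan (List.drop 8 (c :: t))
    else if ("Distance".toList).isPrefixOf (c :: t) then
      "Dist".toList ++ altScan (List.drop 8 (c :: t))
    else if ("Oracle".toList).isPrefixOf (c :: t) then
      "Oracle".toList ++ altScan (List.drop 6 (c :: t))
    else if ("Trajectory".toList).isPrefixOf (c :: t) then
      "Traj".toList ++ altScan (List.drop 10 (c :: t))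
    else c :: altScan t
termination_by cs.length
decreasing_by all_goals (simp only [List.length_drop, List.length_cons]; omega)

def abbreviate_label_alt (text : String) : String :=
  String.ofList (altScan text.toList)

-- ===== PRECONDITION & SPEC =====
def Spec_abbreviate_label (text : String) (out : String) : Prop := out = abbreviate_label_alt text
instance (text : String) (out : String) : Decidable (Spec_abbreviate_label text out) := by unfold Spec_abbreviate_label; infer_instance

-- ===== CLAIM (what is proved, stated in full; the proofs are below) =====
def Claim_equal_abbreviate_label : Prop := ∀ (text : String), Dom_abbreviate_label text → Spec_abbreviate_label text (abbreviate_label text)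

-- ===== LEMMAS AND PROOFS =====

-- Clean recursive model of CPython str.replace (old ≠ []): replace the leftmost
-- occurrence and continue after it.
def rep1 (k v : List Char) (cs : List Char) : List Char :=
  match cs with
  | [] => []
  | c :: t =>
    if k.isPrefixOf (c :: t) then v ++ rep1 k v (List.drop (k.length - 1) t)
    else c :: rep1 k v t
termination_by cs.length
decreasing_by all_goals (simp only [List.length_drop, List.length_cons]; omega)

theorem rep1_nil (k v : List Char) : rep1 k v [] = [] := by rw [rep1]

theorem rep1_cons_pos (k v : List Char) (c : Char) (t : List Char)
    (h : k.isPrefixOf (c :: t) = true) :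
    rep1 k v (c :: t) = v ++ rep1 k v (List.drop (k.length - 1) t) := by
  rw [rep1]; simp [h]

theorem rep1_cons_neg (k v : List Char) (c : Char) (t : List Char)
    (h : ¬ k.isPrefixOf (c :: t) = true) :
    rep1 k v (c :: t) = c :: rep1 k v t := by
  rw [rep1]; simp [h]

-- Bridge: PySem's fuel+accumulator loop computes rep1.
theorem go_eq_rep1 (old new : List Char) (hold : old ≠ []) :
    ∀ (fuel : Nat) (l acc : List Char), l.length ≤ fuel →
      PySem.Chars.replace.go old new fuel l acc = acc.reverse ++ rep1 old new l := by
  intro fuel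
  induction fuel with
  | zero =>
    intro l acc hl
    have : l = [] := by cases l <;> simp_all
    subst this
    rw [PySem.Chars.replace.go.eq_def, rep1_nil]
  | succ fuel ih =>
    intro l acc hl
    cases l with
    | nil => rw [PySem.Chars.replace.go.eq_def, rep1_nil]; simp
    | cons c t =>
      have ht : t.length ≤ fuel := by
        simp only [List.length_cons] at hl; omega
      rw [PySem.Chars.replace.go.eq_def]
      by_cases hp : old.isPrefixOf (c :: t) = true
      · simp only [hp, if_true]
        cases old with
        | nil => exact absurd rfl hold
        | cons d k' =>
          have hdrop : List.drop (d :: k').length (c :: t) = List.drop ((d :: k').length - 1) t := by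
            simp [List.drop_succ_cons]
          rw [hdrop, ih _ _ (by simp only [List.length_drop]; omega)]
          rw [rep1_cons_pos _ _ _ _ hp]
          simp
      · simp only [hp]
        rw [ih t (c :: acc) ht, rep1_cons_neg _ _ _ _ hp]
        simp

theorem chars_replace_eq_rep1 (s old new : List Char) (h : old ≠ []) :
    PySem.Chars.replace s old new = rep1 old new s := by
  have hne : old.isEmpty = false := by cases old <;> simp_all
  rw [PySem.Chars.replace]
  simp only [hne, Bool.false_eq_true, if_false]
  simpa using go_eq_rep1 old new h s.length s [] (le_refl _)

-- No nonempty suffix of w and the key k extend each other.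
def NoOverlap (w k : List Char) : Prop :=
  ∀ u ∈ w.tails, u ≠ [] → ¬ u <+: k ∧ ¬ k <+: u

-- replace passes over a word w that cannot take part in a match of k.
theorem rep1_pass (k v w x : List Char) (h : NoOverlap w k) :
    rep1 k v (w ++ x) = w ++ rep1 k v x := by
  induction w with
  | nil => simp
  | cons a w' ih =>
    have hself := h (a :: w') (by rw [List.tails_cons]; exact List.mem_cons_self) (by simp)
    have hnp : ¬ k.isPrefixOf (a :: w' ++ x) = true := by
      rw [List.isPrefixOf_iff_prefix]
      intro hk
      rcases List.prefix_or_prefix_of_prefix hk (List.prefix_append (a :: w') x) with h1 | h1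
      · exact hself.2 h1
      · exact hself.1 h1
    rw [List.cons_append]
    rw [rep1_cons_neg k v a (w' ++ x) hnp]
    rw [ih (fun u hu hne => h u (by rw [List.tails_cons]; exact List.mem_cons_of_mem _ hu) hne)]
    simp

-- replace matches at the head of k ++ x and continues in x.
theorem rep1_head (k v x : List Char) (h : k ≠ []) :
    rep1 k v (k ++ x) = v ++ rep1 k v x := by
  cases k with
  | nil => exact absurd rfl h
  | cons d k' =>
    have hp : (d :: k').isPrefixOf (d :: (k' ++ x)) = true := by
      rw [List.isPrefixOf_iff_prefix]
      exact ⟨x, by simp⟩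
    rw [List.cons_append, rep1_cons_pos _ _ _ _ hp]
    have : List.drop ((d :: k').length - 1) (k' ++ x) = x := by
      simp only [List.length_cons, Nat.add_sub_cancel]
      exact List.drop_left
    rw [this]

-- Replacing k by v cannot create a new occurrence of u at the front when no
-- nonempty suffix of u and v extend each other.
theorem rep1_no_create (k v : List Char) :
    ∀ (x u : List Char), NoOverlap u v → u <+: rep1 k v x → u <+: x := by
  intro x
  induction x with
  | nil => intro u _ h; rwa [rep1_nil] at h
  | cons c t ih =>
    intro u hu h
    rcases u with _ | ⟨a, u'⟩
    · exact List.nil_prefix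
    by_cases hp : k.isPrefixOf (c :: t) = true
    · rw [rep1_cons_pos _ _ _ _ hp] at h
      have hself := hu (a :: u') (by rw [List.tails_cons]; exact List.mem_cons_self) (by simp)
      rcases List.prefix_or_prefix_of_prefix h (List.prefix_append v _) with h1 | h1
      · exact absurd h1 hself.1
      · exact absurd h1 hself.2
    · rw [rep1_cons_neg _ _ _ _ hp, List.cons_prefix_cons] at h
      obtain ⟨rfl, h2⟩ := h
      have : u' <+: t :=
        ih _ (fun w hw hne => hu w (by rw [List.tails_cons]; exact List.mem_cons_of_mem _ hw) hne) h2
      rw [List.cons_prefix_cons]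
      exact ⟨rfl, this⟩

-- Unfolding lemmas for B's scan.
theorem altScan_nil : altScan [] = [] := by rw [altScan]

-- The five sequential replaces equal B's single scan: no key overlaps another key
-- or a replacement value, so the passes are independent and one scan suffices.
theorem chain_eq_scan : ∀ (cs : List Char),
    rep1 "Trajectory".toList "Traj".toList
      (rep1 "Oracle".toList "Oracle".toList
        (rep1 "Distance".toList "Dist".toList
          (rep1 "Variance".toList "Var".toList
            (rep1 "Temperature".toList "Temp".toList cs)))) = altScan cs := by
  suffices H : ∀ (n : Nat) (cs : List Char), cs.length ≤ n →
      rep1 "Trajectory".toList "Traj".toList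
        (rep1 "Oracle".toList "Oracle".toList
          (rep1 "Distance".toList "Dist".toList
            (rep1 "Variance".toList "Var".toList
              (rep1 "Temperature".toList "Temp".toList cs)))) = altScan cs by
    intro cs; exact H cs.length cs (le_refl _)
  intro n
  induction n with
  | zero =>
    intro cs hl
    have : cs = [] := by cases cs <;> simp_all
    subst this
    simp [rep1_nil, altScan_nil]
  | succ n ih =>
    intro cs hl
    rcases cs with _ | ⟨c, t⟩
    · simp [rep1_nil, altScan_nil]
    rw [altScan]
    by_cases h1 : ("Temperature".toList).isPrefixOf (c :: t) = true
    · simp only [h1, if_true]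
      obtain ⟨rest, hrest⟩ := List.isPrefixOf_iff_prefix.mp h1
      have hk : ("Temperature".toList).length = 11 := by decide
      have hdrop : List.drop 11 ("Temperature".toList ++ rest) = rest := by
        rw [← hk]
        exact List.drop_left
      rw [← hrest, hdrop,
          rep1_head _ _ _ (by decide),
          rep1_pass _ _ "Temp".toList _ (by unfold NoOverlap; decide),
          rep1_pass _ _ "Temp".toList _ (by unfold NoOverlap; decide),
          rep1_pass _ _ "Temp".toList _ (by unfold NoOverlap; decide),
          rep1_pass _ _ "Temp".toList _ (by unfold NoOverlap; decide),
          ih rest (by have hlen := congrArg List.length hrest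
                      simp only [List.length_append, List.length_cons, hk] at hlen
                      simp only [List.length_cons] at hl
                      omega)]
    simp only [h1, Bool.false_eq_true, if_false]
    by_cases h2 : ("Variance".toList).isPrefixOf (c :: t) = true
    · simp only [h2, if_true]
      obtain ⟨rest, hrest⟩ := List.isPrefixOf_iff_prefix.mp h2
      have hk : ("Variance".toList).length = 8 := by decide
      have hdrop : List.drop 8 ("Variance".toList ++ rest) = rest := by
        rw [← hk]
        exact List.drop_left
      rw [← hrest, hdrop,
          rep1_pass _ _ "Variance".toList _ (by unfold NoOverlap; decide),
          rep1_head _ _ _ (by decide),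
          rep1_pass _ _ "Var".toList _ (by unfold NoOverlap; decide),
          rep1_pass _ _ "Var".toList _ (by unfold NoOverlap; decide),
          rep1_pass _ _ "Var".toList _ (by unfold NoOverlap; decide),
          ih rest (by have hlen := congrArg List.length hrest
                      simp only [List.length_append, List.length_cons, hk] at hlen
                      simp only [List.length_cons] at hl
                      omega)]
    simp only [h2, Bool.false_eq_true, if_false]
    by_cases h3 : ("Distance".toList).isPrefixOf (c :: t) = true
    · simp only [h3, if_true]
      obtain ⟨rest, hrest⟩ := List.isPrefixOf_iff_prefix.mp h3
      have hk : ("Distance".toList).length = 8 := by decide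
      have hdrop : List.drop 8 ("Distance".toList ++ rest) = rest := by
        rw [← hk]
        exact List.drop_left
      rw [← hrest, hdrop,
          rep1_pass _ _ "Distance".toList _ (by unfold NoOverlap; decide),
          rep1_pass _ _ "Distance".toList _ (by unfold NoOverlap; decide),
          rep1_head _ _ _ (by decide),
          rep1_pass _ _ "Dist".toList _ (by unfold NoOverlap; decide),
          rep1_pass _ _ "Dist".toList _ (by unfold NoOverlap; decide),
          ih rest (by have hlen := congrArg List.length hrest
                      simp only [List.length_append, List.length_cons, hk] at hlen
                      simp only [List.length_cons] at hl
                      omega)]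
    simp only [h3, Bool.false_eq_true, if_false]
    by_cases h4 : ("Oracle".toList).isPrefixOf (c :: t) = true
    · simp only [h4, if_true]
      obtain ⟨rest, hrest⟩ := List.isPrefixOf_iff_prefix.mp h4
      have hk : ("Oracle".toList).length = 6 := by decide
      have hdrop : List.drop 6 ("Oracle".toList ++ rest) = rest := by
        rw [← hk]
        exact List.drop_left
      rw [← hrest, hdrop,
          rep1_pass _ _ "Oracle".toList _ (by unfold NoOverlap; decide),
          rep1_pass _ _ "Oracle".toList _ (by unfold NoOverlap; decide),
          rep1_pass _ _ "Oracle".toList _ (by unfold NoOverlap; decide),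
          rep1_head _ _ _ (by decide),
          rep1_pass _ _ "Oracle".toList _ (by unfold NoOverlap; decide),
          ih rest (by have hlen := congrArg List.length hrest
                      simp only [List.length_append, List.length_cons, hk] at hlen
                      simp only [List.length_cons] at hl
                      omega)]
    simp only [h4, Bool.false_eq_true, if_false]
    by_cases h5 : ("Trajectory".toList).isPrefixOf (c :: t) = true
    · simp only [h5, if_true]
      obtain ⟨rest, hrest⟩ := List.isPrefixOf_iff_prefix.mp h5
      have hk : ("Trajectory".toList).length = 10 := by decide
      have hdrop : List.drop 10 ("Trajectory".toList ++ rest) = rest := by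
        rw [← hk]
        exact List.drop_left
      rw [← hrest, hdrop,
          rep1_pass _ _ "Trajectory".toList _ (by unfold NoOverlap; decide),
          rep1_pass _ _ "Trajectory".toList _ (by unfold NoOverlap; decide),
          rep1_pass _ _ "Trajectory".toList _ (by unfold NoOverlap; decide),
          rep1_pass _ _ "Trajectory".toList _ (by unfold NoOverlap; decide),
          rep1_head _ _ _ (by decide),
          ih rest (by have hlen := congrArg List.length hrest
                      simp only [List.length_append, List.length_cons, hk] at hlen
                      simp only [List.length_cons] at hl
                      omega)]
    simp only [h5, Bool.false_eq_true, if_false]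
    -- no key matches at this position: every pass keeps the head character
    have p1 : ¬ ("Temperature".toList) <+: (c :: t) := by
      rwa [← List.isPrefixOf_iff_prefix]
    have p2 : ¬ ("Variance".toList) <+: (c :: t) := by
      rwa [← List.isPrefixOf_iff_prefix]
    have p3 : ¬ ("Distance".toList) <+: (c :: t) := by
      rwa [← List.isPrefixOf_iff_prefix]
    have p4 : ¬ ("Oracle".toList) <+: (c :: t) := by
      rwa [← List.isPrefixOf_iff_prefix]
    have p5 : ¬ ("Trajectory".toList) <+: (c :: t) := by
      rwa [← List.isPrefixOf_iff_prefix]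
    have e1 : rep1 "Temperature".toList "Temp".toList (c :: t)
        = c :: rep1 "Temperature".toList "Temp".toList t :=
      rep1_cons_neg _ _ _ _ h1
    have n2 : ¬ ("Variance".toList) <+: rep1 "Temperature".toList "Temp".toList (c :: t) :=
      fun h => p2 (rep1_no_create _ _ _ _ (by unfold NoOverlap; decide) h)
    rw [e1] at n2
    have e2 : rep1 "Variance".toList "Var".toList (c :: rep1 "Temperature".toList "Temp".toList t)
        = c :: rep1 "Variance".toList "Var".toList (rep1 "Temperature".toList "Temp".toList t) :=
      rep1_cons_neg _ _ _ _ (by rwa [List.isPrefixOf_iff_prefix])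
    have n3 : ¬ ("Distance".toList) <+:
        rep1 "Variance".toList "Var".toList (rep1 "Temperature".toList "Temp".toList (c :: t)) :=
      fun h => p3 (rep1_no_create _ _ _ _ (by unfold NoOverlap; decide)
        (rep1_no_create _ _ _ _ (by unfold NoOverlap; decide) h))
    rw [e1, e2] at n3
    have e3 : rep1 "Distance".toList "Dist".toList
          (c :: rep1 "Variance".toList "Var".toList (rep1 "Temperature".toList "Temp".toList t))
        = c :: rep1 "Distance".toList "Dist".toList
          (rep1 "Variance".toList "Var".toList (rep1 "Temperature".toList "Temp".toList t)) :=
      rep1_cons_neg _ _ _ _ (by rwa [List.isPrefixOf_iff_prefix])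
    have n4 : ¬ ("Oracle".toList) <+:
        rep1 "Distance".toList "Dist".toList
          (rep1 "Variance".toList "Var".toList (rep1 "Temperature".toList "Temp".toList (c :: t))) :=
      fun h => p4 (rep1_no_create _ _ _ _ (by unfold NoOverlap; decide)
        (rep1_no_create _ _ _ _ (by unfold NoOverlap; decide)
          (rep1_no_create _ _ _ _ (by unfold NoOverlap; decide) h)))
    rw [e1, e2, e3] at n4
    have e4 : rep1 "Oracle".toList "Oracle".toList
          (c :: rep1 "Distance".toList "Dist".toList
            (rep1 "Variance".toList "Var".toList (rep1 "Temperature".toList "Temp".toList t)))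
        = c :: rep1 "Oracle".toList "Oracle".toList
          (rep1 "Distance".toList "Dist".toList
            (rep1 "Variance".toList "Var".toList (rep1 "Temperature".toList "Temp".toList t))) :=
      rep1_cons_neg _ _ _ _ (by rwa [List.isPrefixOf_iff_prefix])
    have n5 : ¬ ("Trajectory".toList) <+:
        rep1 "Oracle".toList "Oracle".toList
          (rep1 "Distance".toList "Dist".toList
            (rep1 "Variance".toList "Var".toList
              (rep1 "Temperature".toList "Temp".toList (c :: t)))) :=
      fun h => p5 (rep1_no_create _ _ _ _ (by unfold NoOverlap; decide)
        (rep1_no_create _ _ _ _ (by unfold NoOverlap; decide)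
          (rep1_no_create _ _ _ _ (by unfold NoOverlap; decide)
            (rep1_no_create _ _ _ _ (by unfold NoOverlap; decide) h))))
    rw [e1, e2, e3, e4] at n5
    have e5 : rep1 "Trajectory".toList "Traj".toList
          (c :: rep1 "Oracle".toList "Oracle".toList
            (rep1 "Distance".toList "Dist".toList
              (rep1 "Variance".toList "Var".toList (rep1 "Temperature".toList "Temp".toList t))))
        = c :: rep1 "Trajectory".toList "Traj".toList
          (rep1 "Oracle".toList "Oracle".toList
            (rep1 "Distance".toList "Dist".toList
              (rep1 "Variance".toList "Var".toList (rep1 "Temperature".toList "Temp".toList t)))) :=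
      rep1_cons_neg _ _ _ _ (by rwa [List.isPrefixOf_iff_prefix])
    rw [e1, e2, e3, e4, e5,
        ih t (by simp only [List.length_cons] at hl; omega)]

-- ===== VERDICT (by name: the statement is the Claim_ definition above) =====
theorem abbreviate_label_spec : Claim_equal_abbreviate_label := by
  unfold Claim_equal_abbreviate_label Spec_abbreviate_label
  intro text _
  unfold abbreviate_label abbreviate_label_alt
  simp only [List.foldl, PySem.Str.replace, String.toList_ofList]
  rw [chars_replace_eq_rep1 _ _ _ (by decide), chars_replace_eq_rep1 _ _ _ (by decide),
      chars_replace_eq_rep1 _ _ _ (by decide), chars_replace_eq_rep1 _ _ _ (by decide),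
      chars_replace_eq_rep1 _ _ _ (by decide)]
  rw [chain_eq_scan]
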